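-- pv_equiv track=rewrite | github.com/JiIJu/algorithm_algorithm | 학사 지이주/2023/4월/0428/풍선터뜨리기.py | solution
-- ===== SOURCE A (Python) =====
-- def solution(a):
--     answer = 0
--     n = len(a)
--     left = [0] * n
--     right = [0] * n
--     left[0] = a[0]
--     for i in range(1,n):
--         left[i] = min(left[i-1],a[i])
--     right[-1] = a[-1]
--     for i in range(n-2,-1,-1):
--         right[i] = min(right[i+1],a[i])
--     for i in range(n):
--         temp = 0
--         if left[i]<a[i]:
--             temp+=1
--         if right[i]<a[i]:
--             temp+=1
--         if temp<=1:
--             answer+=1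
--     return answer
-- ===== SOURCE B (Python) =====
-- def solution(a):
--     run = a[0]
--     cntL = 0
--     for x in a:
--         if x <= run:
--             cntL += 1
--             run = x
--     run = a[-1]
--     cntR = 0
--     for x in reversed(a):
--         if x <= run:
--             cntR += 1
--             run = x
--     return cntL + cntR - a.count(min(a))
-- ===== Notes on version B (the rewrite author's own statement) =====
-- stated objective: simpler
-- what changed: Replaces A's two O(n) scratch arrays of prefix/suffix minima and the per-index two-flag test by two scalar running-minimum scans counting prefix- and suffix-minimum positions, combined by inclusion-exclusion with the count of the global minimum.
import Mathlib
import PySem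

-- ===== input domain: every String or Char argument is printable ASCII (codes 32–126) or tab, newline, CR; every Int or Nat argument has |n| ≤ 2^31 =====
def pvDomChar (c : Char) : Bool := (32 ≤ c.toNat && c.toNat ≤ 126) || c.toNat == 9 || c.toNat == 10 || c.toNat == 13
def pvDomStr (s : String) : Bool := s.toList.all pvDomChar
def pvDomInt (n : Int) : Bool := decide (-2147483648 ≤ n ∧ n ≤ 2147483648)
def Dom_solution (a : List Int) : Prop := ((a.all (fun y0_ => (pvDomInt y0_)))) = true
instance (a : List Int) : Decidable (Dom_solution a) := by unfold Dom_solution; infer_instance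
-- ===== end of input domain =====

-- B replaces A's two O(n) scratch arrays and three-way per-index test by two scalar
-- running-minimum scans plus inclusion–exclusion with the count of the global minimum.

-- ===== PORT A =====
-- 'for i in range(1,n): left[i] = min(left[i-1], a[i])' — the loop state is the last
-- written cell left[i-1]; the list produced is exactly the cells left[1..n-1].
def buildMins (prev : Int) : List Int → List Int
  | [] => []
  | x :: xs => min prev x :: buildMins (min prev x) xs

-- final loop 'for i in range(n)': reads left[i], right[i], a[i] position by position
def countLoop : List Int → List Int → List Int → Int
  | l :: ls, r :: rs, x :: xs =>
      (let temp : Int := (if l < x then 1 else 0) + (if r < x then 1 else 0)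
       if temp ≤ 1 then 1 else 0) + countLoop ls rs xs
  | _, _, _ => 0

def solution (a : List Int) : Int :=
  match a with
  | [] => 0  -- unreachable under Pre_solution: Python's a[0] raises IndexError here
  | h :: t =>
    let left := h :: buildMins h t          -- left[0] = a[0], then the forward loop
    let ar := (h :: t).reverse
    -- 'right[-1] = a[-1]; for i in range(n-2,-1,-1): right[i] = min(right[i+1], a[i])'
    -- is the same running-min loop on the reversed list, written back in reverse
    let right := (ar.headD 0 :: buildMins (ar.headD 0) ar.tail).reverse
    countLoop left right (h :: t)

-- ===== PORT B =====
-- one step of 'if x <= run: cnt += 1; run = x'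
def scanStep (s : Int × Int) (x : Int) : Int × Int :=
  if x ≤ s.1 then (x, s.2 + 1) else s

def solution_alt (a : List Int) : Int :=
  match a with
  | [] => 0  -- unreachable under Pre_solution: Python's a[0] raises IndexError here
  | h :: t =>
    let cntL := ((h :: t).foldl scanStep (h, 0)).2
    let ar := (h :: t).reverse
    let cntR := (ar.foldl scanStep (ar.headD 0, 0)).2
    let m := ((PySem.List.min? (h :: t) (fun y => y)).getD 0)
    cntL + cntR - (PySem.List.count (h :: t) m : Int)

-- ===== PRECONDITION & SPEC =====
-- Pre_ excludes only the empty list, on which Python's A raises IndexError (a[0]).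
def Pre_solution (a : List Int) : Prop := a ≠ []
instance (a : List Int) : Decidable (Pre_solution a) := by unfold Pre_solution; infer_instance
def pvWitness_solution : List Int := ([1, 3, 1])
def Spec_solution (a : List Int) (out : Int) : Prop := out = solution_alt a
instance (a : List Int) (out : Int) : Decidable (Spec_solution a out) := by unfold Spec_solution; infer_instance

-- ===== CLAIM (what is proved, stated in full; the proofs are below) =====
def Claim_equal_solution : Prop := ∀ (a : List Int), Dom_solution a → Pre_solution a → Spec_solution a (solution a)

-- ===== LEMMAS AND PROOFS =====

-- min of an optional accumulator and one more element
def omin : Option Int → Int → Int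
  | none, x => x
  | some m, x => min m x

-- running minimum of a list on top of an optional accumulator
def minF (o : Option Int) (u : List Int) : Option Int :=
  u.foldl (fun o y => some (omin o y)) o

-- the inclusive running-minimum list (A's 'left' array), with optional seed
def leftFrom : Option Int → List Int → List Int
  | _, [] => []
  | o, x :: xs => omin o x :: leftFrom (some (omin o x)) xs

-- A's 'right' array: inclusive suffix minima
def RightL (xs : List Int) : List Int := (leftFrom none xs.reverse).reverse

-- sum of f over all decompositions p ++ x :: s of the input, left to right
def walk (f : List Int → Int → List Int → Int) : List Int → List Int → Int
  | _, [] => 0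
  | p, x :: s => f p x s + walk f (p ++ [x]) s

def gL (p : List Int) (x : Int) : Int := if ∀ y ∈ p, x ≤ y then 1 else 0
def fL (p : List Int) (x : Int) (_ : List Int) : Int := gL p x
def fR (_ : List Int) (x : Int) (s : List Int) : Int := if ∀ y ∈ s, x ≤ y then 1 else 0
def fA (p : List Int) (x : Int) (s : List Int) : Int :=
  if (∀ y ∈ p, x ≤ y) ∨ (∀ y ∈ s, x ≤ y) then 1 else 0
def fM (m : Int) (_ : List Int) (x : Int) (_ : List Int) : Int := if x = m then 1 else 0

theorem walk_nil (f : List Int → Int → List Int → Int) (p : List Int) : walk f p [] = 0 := rfl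
theorem walk_cons (f : List Int → Int → List Int → Int) (p : List Int) (x : Int) (s : List Int) :
    walk f p (x :: s) = f p x s + walk f (p ++ [x]) s := rfl

theorem leftFrom_some_eq_buildMins (xs : List Int) : ∀ m, leftFrom (some m) xs = buildMins m xs := by
  induction xs with
  | nil => intro m; rfl
  | cons x xs ih => intro m; simp [leftFrom, buildMins, omin, ih]

theorem minF_cons (o : Option Int) (x : Int) (u : List Int) :
    minF o (x :: u) = minF (some (omin o x)) u := rfl

theorem leftFrom_append (u : List Int) : ∀ (o : Option Int) (v : List Int),
    leftFrom o (u ++ v) = leftFrom o u ++ leftFrom (minF o u) v := by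
  induction u with
  | nil => intro o v; rfl
  | cons x u ih => intro o v; simp [leftFrom, ih, minF_cons]

theorem minF_append_single (o : Option Int) (p : List Int) (x : Int) :
    minF o (p ++ [x]) = some (omin (minF o p) x) := by
  simp [minF, List.foldl_append]

theorem key1 (u : List Int) : ∀ (o : Option Int) (x : Int),
    omin (minF o u) x < x ↔ omin o x < x ∨ ∃ y ∈ u, y < x := by
  induction u with
  | nil => intro o x; simp [minF]
  | cons z u ih =>
    intro o x
    rw [minF_cons, ih]
    have hz : omin (some (omin o z)) x < x ↔ omin o x < x ∨ z < x := by
      cases o <;> simp [omin, min_lt_iff] <;> omega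
    rw [hz]
    simp only [List.mem_cons]
    constructor
    · rintro ((h | h) | ⟨y, hy, hlt⟩)
      · exact Or.inl h
      · exact Or.inr ⟨z, Or.inl rfl, h⟩
      · exact Or.inr ⟨y, Or.inr hy, hlt⟩
    · rintro (h | ⟨y, hy2, hlt⟩)
      · exact Or.inl (Or.inl h)
      · rcases hy2 with rfl | hy
        · exact Or.inl (Or.inr hlt)
        · exact Or.inr ⟨y, hy, hlt⟩

theorem lt_iff_not_all (p : List Int) (x : Int) :
    omin (minF none p) x < x ↔ ¬ (∀ y ∈ p, x ≤ y) := by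
  rw [key1]
  push_neg
  constructor
  · rintro (h | ⟨y, hy, hlt⟩)
    · simp [omin] at h
    · exact ⟨y, hy, hlt⟩
  · rintro ⟨y, hy, hlt⟩
    exact Or.inr ⟨y, hy, hlt⟩

theorem le_iff_all (p : List Int) (m x : Int) (h : minF none p = some m) :
    x ≤ m ↔ ∀ y ∈ p, x ≤ y := by
  have hlt := lt_iff_not_all p x
  rw [h] at hlt
  simp only [omin, min_lt_iff] at hlt
  constructor
  · intro hx
    by_contra hc
    have := hlt.mpr hc
    omega
  · intro hall
    by_contra hc
    exact (hlt.mp (Or.inl (by omega))) hall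

theorem RightL_cons (x : Int) (xs : List Int) :
    RightL (x :: xs) = omin (minF none xs.reverse) x :: RightL xs := by
  unfold RightL
  rw [List.reverse_cons, leftFrom_append]
  simp [leftFrom]

theorem walk_append (g : List Int → Int → Int) (u : List Int) :
    ∀ (p v : List Int), walk (fun p x _ => g p x) p (u ++ v) =
      walk (fun p x _ => g p x) p u + walk (fun p x _ => g p x) (p ++ u) v := by
  induction u with
  | nil => intro p v; simp [walk_nil]
  | cons x u ih =>
    intro p v
    rw [List.cons_append, walk_cons, walk_cons, ih (p ++ [x]) v]
    simp [List.append_assoc]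
    ring

theorem walk_pre_irrel (g : Int → List Int → Int) (xs : List Int) :
    ∀ p q, walk (fun _ x s => g x s) p xs = walk (fun _ x s => g x s) q xs := by
  induction xs with
  | nil => intro p q; rfl
  | cons x xs ih => intro p q; rw [walk_cons, walk_cons, ih (p ++ [x]) (q ++ [x])]

theorem walk_congr (f g : List Int → Int → List Int → Int) (xs : List Int) :
    ∀ (pre : List Int), (∀ p x s, p ++ x :: s = pre ++ xs → f p x s = g p x s) →
    walk f pre xs = walk g pre xs := by
  induction xs with
  | nil => intro pre _; rfl
  | cons x xs ih =>
    intro pre h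
    rw [walk_cons, walk_cons, h pre x xs rfl,
      ih (pre ++ [x]) (fun p y s hp => h p y s (by simpa [List.append_assoc] using hp))]

theorem walk_three (m : Int) (xs : List Int) :
    ∀ pre, walk (fun p x s => fL p x s + fR p x s - fM m p x s) pre xs =
      walk fL pre xs + walk fR pre xs - walk (fM m) pre xs := by
  induction xs with
  | nil => intro pre; simp [walk_nil]
  | cons x xs ih =>
    intro pre
    rw [walk_cons, walk_cons, walk_cons, walk_cons, ih (pre ++ [x])]
    ring

theorem main_A (xs : List Int) : ∀ (pre : List Int),
    countLoop (leftFrom (minF none pre) xs) (RightL xs) xs = walk fA pre xs := by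
  induction xs with
  | nil => intro pre; simp [leftFrom, RightL, walk_nil, countLoop]
  | cons x xs ih =>
    intro pre
    rw [RightL_cons]
    simp only [leftFrom, countLoop, walk_cons]
    have hl : leftFrom (some (omin (minF none pre) x)) xs = leftFrom (minF none (pre ++ [x])) xs := by
      rw [minF_append_single]
    rw [hl, ih (pre ++ [x])]
    congr 1
    have h1 : omin (minF none pre) x < x ↔ ¬ (∀ y ∈ pre, x ≤ y) := lt_iff_not_all pre x
    have h2 : omin (minF none xs.reverse) x < x ↔ ¬ (∀ y ∈ xs, x ≤ y) := by
      rw [lt_iff_not_all]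
      constructor
      · intro h hc; exact h (fun y hy => hc y (List.mem_reverse.mp hy))
      · intro h hc; exact h (fun y hy => hc y (List.mem_reverse.mpr hy))
    unfold fA
    by_cases hp : ∀ y ∈ pre, x ≤ y <;> by_cases hs : ∀ y ∈ xs, x ≤ y
    · have e1 : ¬ omin (minF none pre) x < x := fun h => (h1.mp h) hp
      have e2 : ¬ omin (minF none xs.reverse) x < x := fun h => (h2.mp h) hs
      simp [e1, e2, hp, hs]
      intro y hy hlt
      exact absurd hlt (not_lt.mpr (hp y hy))
    · have e1 : ¬ omin (minF none pre) x < x := fun h => (h1.mp h) hp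
      simp only [if_neg e1, if_pos (h2.mpr hs)]
      simp [hp]
      intro y hy hlt
      exact absurd hlt (not_lt.mpr (hp y hy))
    · have e2 : ¬ omin (minF none xs.reverse) x < x := fun h => (h2.mp h) hs
      simp only [if_pos (h1.mpr hp), if_neg e2]
      simp [hs]
      intro y hy hlt z hz
      exact hs z hz
    · simp only [if_pos (h1.mpr hp), if_pos (h2.mpr hs)]
      simp [hp, hs]

theorem bscan (xs : List Int) : ∀ (pre : List Int) (m c : Int), minF none pre = some m →
    (xs.foldl scanStep (m, c)).2 = c + walk fL pre xs := by
  induction xs with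
  | nil => intro pre m c _; simp [walk_nil]
  | cons x xs ih =>
    intro pre m c hm
    have hall := le_iff_all pre m x hm
    have hmF : minF none (pre ++ [x]) = some (min m x) := by
      rw [minF_append_single, hm]; rfl
    rw [List.foldl_cons, walk_cons]
    simp only [scanStep, fL, gL]
    by_cases hx : x ≤ m
    · have hmin : min m x = x := by omega
      rw [if_pos hx]
      rw [ih (pre ++ [x]) x (c + 1) (by rw [hmF, hmin]), if_pos (hall.mp hx)]
      ring
    · have hmin : min m x = m := by omega
      rw [if_neg hx]
      rw [ih (pre ++ [x]) m c (by rw [hmF, hmin]), if_neg (fun h => hx (hall.mpr h))]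
      ring

theorem walk_rev (xs : List Int) : ∀ (pre : List Int),
    walk fL pre xs.reverse =
      walk (fun _ x s => if (∀ y ∈ s, x ≤ y) ∧ (∀ y ∈ pre, x ≤ y) then 1 else 0) [] xs := by
  induction xs with
  | nil => intro pre; rfl
  | cons x xs ih =>
    intro pre
    rw [List.reverse_cons]
    have hfl : (fun (p : List Int) (x : Int) (_ : List Int) => gL p x) = fL := rfl
    have ha := walk_append gL xs.reverse pre [x]
    rw [hfl] at ha
    rw [ha, ih pre, walk_cons fL, walk_nil, walk_cons]
    rw [walk_pre_irrel (fun x s => if (∀ y ∈ s, x ≤ y) ∧ (∀ y ∈ pre, x ≤ y) then 1 else 0)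
      xs ([] ++ [x]) []]
    have h1 : (∀ y ∈ pre ++ xs.reverse, x ≤ y) ↔ (∀ y ∈ xs, x ≤ y) ∧ (∀ y ∈ pre, x ≤ y) := by
      constructor
      · intro h
        exact ⟨fun y hy => h y (by simp [hy]), fun y hy => h y (by simp [hy])⟩
      · rintro ⟨hs, hp⟩ y hy
        rcases List.mem_append.mp hy with hy | hy
        · exact hp y hy
        · exact hs y (List.mem_reverse.mp hy)
    simp only [fL, gL, h1]
    ring

theorem count_walk (v : Int) (xs : List Int) : ∀ pre,
    walk (fM v) pre xs = (PySem.List.count xs v : Int) := by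
  induction xs with
  | nil => intro pre; simp [walk_nil, PySem.List.count_eq]
  | cons x xs ih =>
    intro pre
    rw [walk_cons, ih (pre ++ [x])]
    simp only [fM, PySem.List.count_eq, List.count_cons]
    by_cases h : x = v
    · simp [h]
      omega
    · simp [h]

theorem main_eq (h : Int) (t : List Int) : solution (h :: t) = solution_alt (h :: t) := by
  cases hr : (h :: t).reverse with
  | nil => exact absurd hr (by simp)
  | cons v u =>
    set M : Int := t.foldl min h with hM
    have hMmem : M ∈ h :: t := by
      rcases PySem.List.foldl_min_mem t h with h1 | h1
      · rw [hM, h1]; exact List.mem_cons_self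
      · exact List.mem_cons_of_mem _ h1
    have hMle : ∀ y ∈ h :: t, M ≤ y := by
      intro y hy
      rcases List.mem_cons.mp hy with rfl | hy
      · exact (PySem.List.foldl_min_le t y).1
      · exact (PySem.List.foldl_min_le t h).2 y hy
    -- A side: the three loops compute walk fA
    have hA : solution (h :: t) = walk fA [] (h :: t) := by
      have e1 : leftFrom (minF none []) (h :: t) = h :: buildMins h t := by
        simp [minF, leftFrom, omin, leftFrom_some_eq_buildMins]
      have e2 : RightL (h :: t) = (v :: buildMins v u).reverse := by
        unfold RightL
        rw [hr]
        simp [leftFrom, omin, leftFrom_some_eq_buildMins]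
      have hsol : solution (h :: t)
          = countLoop (h :: buildMins h t) ((v :: buildMins v u).reverse) (h :: t) := by
        simp only [solution, hr, List.headD_cons, List.tail_cons]
      rw [hsol, ← e1, ← e2, main_A (h :: t) []]
    -- B side: the two scans and the count
    have hcntL : ((h :: t).foldl scanStep (h, 0)).2 = walk fL [] (h :: t) := by
      rw [List.foldl_cons, show scanStep (h, 0) h = (h, 1) from by simp [scanStep],
        bscan t [h] h 1 rfl, walk_cons]
      simp [fL, gL]
    have hcntR : ((v :: u).foldl scanStep (v, 0)).2 = walk fR [] (h :: t) := by
      rw [List.foldl_cons, show scanStep (v, 0) v = (v, 1) from by simp [scanStep],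
        bscan u [v] v 1 rfl]
      have h1 : (1 : Int) + walk fL [v] u = walk fL [] (v :: u) := by
        rw [walk_cons]
        simp [fL, gL]
      rw [h1, ← hr, walk_rev (h :: t) []]
      exact walk_congr _ _ (h :: t) [] (fun p x s _ => by simp [fR])
    have hm : ((PySem.List.min? (h :: t) (fun y => y)).getD 0) = M := by
      rw [PySem.List.min?_id_cons]; rfl
    -- pointwise inclusion–exclusion over the decompositions of h :: t
    have hpt : ∀ p x s, p ++ x :: s = [] ++ (h :: t) →
        fA p x s = fL p x s + fR p x s - fM M p x s := by
      intro p x s hsp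
      simp only [List.nil_append] at hsp
      have hx : x ∈ h :: t := by
        rw [← hsp]; exact List.mem_append_right _ List.mem_cons_self
      have key : ((∀ y ∈ p, x ≤ y) ∧ (∀ y ∈ s, x ≤ y)) ↔ x = M := by
        constructor
        · rintro ⟨hp', hs'⟩
          have hxle : x ≤ M := by
            have hMm : M ∈ p ++ x :: s := by rw [hsp]; exact hMmem
            rcases List.mem_append.mp hMm with hm' | hm'
            · exact hp' M hm'
            · rcases List.mem_cons.mp hm' with he | hm'
              · omega
              · exact hs' M hm'
          have hlex : M ≤ x := hMle x hx
          omega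
        · intro he
          subst he
          constructor
          · intro y hy
            exact hMle y (by rw [← hsp]; exact List.mem_append_left _ hy)
          · intro y hy
            exact hMle y (by rw [← hsp]; exact List.mem_append_right _ (List.mem_cons_of_mem _ hy))
      unfold fA fL gL fR fM
      by_cases hp' : ∀ y ∈ p, x ≤ y <;> by_cases hs' : ∀ y ∈ s, x ≤ y
      · rw [if_pos (Or.inl hp'), if_pos hp', if_pos hs', if_pos (key.mp ⟨hp', hs'⟩)]
        norm_num
      · have hne : x ≠ M := fun he => hs' ((key.mpr he).2)
        rw [if_pos (Or.inl hp'), if_pos hp', if_neg hs', if_neg hne]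
        norm_num
      · have hne : x ≠ M := fun he => hp' ((key.mpr he).1)
        rw [if_pos (Or.inr hs'), if_neg hp', if_pos hs', if_neg hne]
        norm_num
      · have hne : x ≠ M := fun he => hp' ((key.mpr he).1)
        rw [if_neg (by tauto), if_neg hp', if_neg hs', if_neg hne]
        norm_num
    have halt : solution_alt (h :: t)
        = ((h :: t).foldl scanStep (h, 0)).2 + ((v :: u).foldl scanStep (v, 0)).2
          - (PySem.List.count (h :: t) (((PySem.List.min? (h :: t) (fun y => y)).getD 0)) : Int) := by
      simp only [solution_alt, hr, List.headD_cons]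
    rw [hA, walk_congr fA (fun p x s => fL p x s + fR p x s - fM M p x s) (h :: t) [] hpt,
      walk_three M (h :: t) [], halt, hcntL, hcntR, hm, ← count_walk M (h :: t) []]

-- ===== VERDICT (by name: the statement is the Claim_ definition above) =====
theorem solution_spec : Claim_equal_solution := by
  intro a _ hpre
  unfold Spec_solution
  match a with
  | [] => exact absurd rfl hpre
  | h :: t => exact main_eq h t
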